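-- pv_equiv track=rewrite | github.com/nihzh/CyberCipher | algorithms/vigenereCipher.py | matrixStrCut
-- ===== SOURCE A (Python) =====
-- def matrixStrCut(text, k):
--     # create k empty string in a list
--     strGroups = ['' for _ in range(k)]
--
--     # process by each char
--     for i, char in enumerate(text):
--         # filter the non-alpha chars
--         if not char.isalpha():
--             continue
--         # calculate which group, insert
--         index = i % k
--         strGroups[index] += char
--
--     return strGroups
-- ===== SOURCE B (Python) =====
-- def matrixStrCut(text, k):
--     # group-major: rebuild each group g directly from one filtered scan,
--     # instead of char-major in-place accumulation
--     return [''.join(c for i, c in enumerate(text) if c.isalpha() and i % k == g)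
--             for g in range(k)]
-- ===== Notes on version B (the rewrite author's own statement) =====
-- stated objective: alternative
-- what changed: Group-major rebuild: a comprehension over range(k) constructs each group directly by filtering one enumerate pass per group, replacing A's char-major loop that mutates a k-slot accumulator in place; Pre_ excludes k<=0 with an alphabetic char present, exactly where A raises (ZeroDivisionError/IndexError).
import Mathlib
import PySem

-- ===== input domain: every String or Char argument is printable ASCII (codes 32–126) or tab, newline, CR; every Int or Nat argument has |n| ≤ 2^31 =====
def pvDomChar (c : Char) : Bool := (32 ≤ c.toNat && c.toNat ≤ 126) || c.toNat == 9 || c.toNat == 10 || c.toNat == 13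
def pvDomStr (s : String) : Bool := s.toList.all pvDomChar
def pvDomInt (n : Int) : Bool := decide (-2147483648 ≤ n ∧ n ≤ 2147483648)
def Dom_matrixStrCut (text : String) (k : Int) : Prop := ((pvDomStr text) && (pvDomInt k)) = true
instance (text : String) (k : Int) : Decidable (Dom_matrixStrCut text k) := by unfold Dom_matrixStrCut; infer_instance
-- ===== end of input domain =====

-- B is a group-major rebuild (one filtered scan per group) instead of A's char-major in-place accumulator; equal return values on Pre_ (A raises for k ≤ 0 with an alphabetic char present, where B returns []).

-- ===== PORT A =====
-- strings are handled as List Char (PySem convention) and packed with String.ofList at the end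
def pvStepA (k : Int) (gs : List (List Char)) (p : Int × Char) : List (List Char) :=
  if !(PySem.Chars.isalpha p.2) then gs
  else
    let index := PySem.Int.mod p.1 k
    PySem.List.pySetD gs index (PySem.List.pyGetD gs index [] ++ [p.2])

def matrixStrCut (text : String) (k : Int) : List String :=
  -- strGroups = ['' for _ in range(k)], then the char loop, then the groups are packed
  (((PySem.List.enumerate text.toList 0).foldl (pvStepA k)
      ((PySem.List.pyRange 0 k 1).map (fun _ => []))).map (fun g => String.ofList g))

-- ===== PORT B =====
def matrixStrCut_alt (text : String) (k : Int) : List String :=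
  (PySem.List.pyRange 0 k 1).map (fun g =>
    String.ofList (((PySem.List.enumerate text.toList 0).filter
      (fun p => PySem.Chars.isalpha p.2 && (PySem.Int.mod p.1 k == g))).map (fun p => p.2)))

-- ===== PRECONDITION & SPEC =====
-- Pre_ excludes exactly the inputs where A raises: k ≤ 0 together with an alphabetic char (i % k then hits k = 0 or an empty group list)
def Pre_matrixStrCut (text : String) (k : Int) : Prop :=
  1 ≤ k ∨ text.toList.all (fun c => !PySem.Chars.isalpha c) = true
instance (text : String) (k : Int) : Decidable (Pre_matrixStrCut text k) := by unfold Pre_matrixStrCut; infer_instance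
def pvWitness_matrixStrCut : String × Int := ("ab c", 2)

def Spec_matrixStrCut (text : String) (k : Int) (out : List String) : Prop := out = matrixStrCut_alt text k
instance (text : String) (k : Int) (out : List String) : Decidable (Spec_matrixStrCut text k out) := by unfold Spec_matrixStrCut; infer_instance

-- ===== CLAIM (what is proved, stated in full; the proofs are below) =====
def Claim_equal_matrixStrCut : Prop := ∀ (text : String) (k : Int), Dom_matrixStrCut text k → Pre_matrixStrCut text k → Spec_matrixStrCut text k (matrixStrCut text k)

-- ===== LEMMAS AND PROOFS =====

-- no alphabetic char: every step of A's fold is the identity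
lemma pvFold_const (k : Int) (cs : List Char) (h : ∀ c ∈ cs, PySem.Chars.isalpha c = false) :
    ∀ (i : Int) (gs : List (List Char)),
      (PySem.List.enumerate cs i).foldl (pvStepA k) gs = gs := by
  induction cs with
  | nil => intro i gs; simp [PySem.List.enumerate_nil]
  | cons c cs ih =>
    intro i gs
    rw [PySem.List.enumerate_cons]
    simp only [List.foldl_cons]
    rw [show pvStepA k gs (i, c) = gs by simp [pvStepA, h c (by simp)]]
    exact ih (fun x hx => h x (by simp [hx])) (i + 1) gs

-- main invariant of A's fold, for k = ↑K with 1 ≤ K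
lemma pvFold_inv (K : Nat) (hK : 1 ≤ K) :
    ∀ (cs : List Char) (i : Nat) (gs : List (List Char)), gs.length = K →
      (PySem.List.enumerate cs (i : Int)).foldl (pvStepA (K : Int)) gs
      = (List.range K).map (fun g => gs.getD g [] ++
          ((PySem.List.enumerate cs (i : Int)).filter
            (fun p => PySem.Chars.isalpha p.2 && (PySem.Int.mod p.1 (K : Int) == (g : Int)))).map (fun p => p.2)) := by
  intro cs
  induction cs with
  | nil =>
    intro i gs hg
    simp only [PySem.List.enumerate_nil, List.foldl_nil, List.filter_nil, List.map_nil,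
      List.append_nil]
    subst hg
    apply List.ext_getElem
    · simp
    · intro n h1 h2
      simp only [List.length_map, List.length_range] at h1 h2 ⊢
      simp [List.getD_eq_getElem?_getD, List.getElem?_eq_getElem h2]
  | cons c cs ih =>
    intro i gs hg
    rw [PySem.List.enumerate_cons]
    simp only [List.foldl_cons, List.filter_cons]
    by_cases hal : PySem.Chars.isalpha c
    · -- alphabetic: the char goes into group i % K
      have hr : i % K < K := Nat.mod_lt _ (by omega)
      have hstep : pvStepA (K : Int) gs ((i : Int), c)
          = gs.set (i % K) (gs.getD (i % K) [] ++ [c]) := by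
        simp only [pvStepA, hal, Bool.not_true, Bool.false_eq_true, if_false]
        rw [PySem.Int.mod_natCast, PySem.List.pyGetD_natCast, PySem.List.pySetD_natCast]
      rw [hstep]
      have hcast : (i : Int) + 1 = ((i + 1 : Nat) : Int) := by push_cast; ring
      rw [hcast, ih (i + 1) _ (by simp [hg])]
      apply List.ext_getElem
      · simp
      · intro n h1 h2
        simp only [List.length_map, List.length_range] at h1 h2
        simp only [List.getElem_map, List.getElem_range]
        by_cases hn : i % K = n
        · subst hn
          have hset : (gs.set (i % K) (gs.getD (i % K) [] ++ [c])).getD (i % K) []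
              = gs.getD (i % K) [] ++ [c] := by
            simp [List.getD_eq_getElem?_getD, hg, hr]
          rw [hset]
          simp [hal]
        · have hset : (gs.set (i % K) (gs.getD (i % K) [] ++ [c])).getD n []
              = gs.getD n [] := by
            simp [List.getD_eq_getElem?_getD, hn]
          rw [hset]
          have hne : ((i : Int) % (K : Int)) ≠ (n : Int) := by
            rw [← Int.natCast_mod]; exact_mod_cast hn
          simp [hal, hne]
    · -- non-alphabetic: skipped on both sides
      have hstep : pvStepA (K : Int) gs ((i : Int), c) = gs := by
        simp [pvStepA, hal]
      rw [hstep]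
      have hcast : (i : Int) + 1 = ((i + 1 : Nat) : Int) := by push_cast; ring
      rw [hcast, ih (i + 1) gs hg]
      simp [hal]

-- ===== VERDICT (by name: the statement is the Claim_ definition above) =====
theorem matrixStrCut_spec : Claim_equal_matrixStrCut := by
  intro text k _ hpre
  unfold Spec_matrixStrCut matrixStrCut matrixStrCut_alt
  by_cases hall : ∀ c ∈ text.toList, PySem.Chars.isalpha c = false
  · -- no alphabetic char at all: both sides are k empty groups
    rw [pvFold_const k text.toList hall 0]
    rw [List.map_map]
    apply List.map_congr_left
    intro g _
    have hfil : (PySem.List.enumerate text.toList 0).filter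
        (fun p => PySem.Chars.isalpha p.2 && (PySem.Int.mod p.1 k == g)) = [] := by
      apply List.filter_eq_nil_iff.mpr
      intro p hp
      have h2 : p.2 ∈ text.toList := by
        have := List.mem_map_of_mem (f := fun q : Int × Char => q.2) hp
        rwa [PySem.List.map_snd_enumerate] at this
      simp [hall p.2 h2]
    simp [hfil]
  · -- an alphabetic char exists, so Pre_ forces 1 ≤ k
    have hk : 1 ≤ k := by
      rcases hpre with h | h
      · exact h
      · exfalso
        apply hall
        intro c hc
        simpa using (List.all_eq_true.mp h) c hc
    lift k to Nat using (by omega : (0:Int) ≤ k) with K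
    have hK : 1 ≤ K := by exact_mod_cast hk
    have hlen : ((PySem.List.pyRange 0 (K : Int) 1).map
        (fun _ => ([] : List Char))).length = K := by
      simp [PySem.List.length_pyRange_one]
    have hfold := pvFold_inv K hK text.toList 0 _ hlen
    simp only [Nat.cast_zero] at hfold
    rw [hfold]
    rw [PySem.List.pyRange_zero_nat]
    simp only [List.map_map]
    apply List.map_congr_left
    intro g hg
    have hglt : g < K := List.mem_range.mp hg
    simp [List.getD_eq_getElem?_getD, List.getElem?_map, hglt]
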